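-- pv_equiv track=rewrite | github.com/NingchuanIC/data_experiment | GraphSAGE/GraphSAGE.py | parse_topk_list
-- ===== SOURCE A (Python) =====
-- def parse_topk_list(topk_list: str) -> list[int]:
-- 	values: list[int] = []
-- 	for token in topk_list.split(","):
-- 		token = token.strip()
-- 		if not token:
-- 			continue
-- 		k = int(token)
-- 		if k <= 0:
-- 			raise ValueError("All Top-k values must be positive integers.")
-- 		values.append(k)
--
-- 	if not values:
-- 		raise ValueError("--topk-list must contain at least one positive integer.")
--
-- 	return list(dict.fromkeys(values))
-- ===== SOURCE B (Python) =====
-- def parse_topk_list(topk_list: str) -> list[int]: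
-- 	values = [int(t) for t in topk_list.split(",") if t.strip()]
-- 	if not values:
-- 		raise ValueError("--topk-list must contain at least one positive integer.")
-- 	if min(values) <= 0:
-- 		raise ValueError("All Top-k values must be positive integers.")
--
-- 	def first_occurrences(vs: list[int]) -> list[int]:
-- 		if not vs:
-- 			return []
-- 		head = vs[0]
-- 		return [head] + first_occurrences([v for v in vs[1:] if v != head])
--
-- 	return first_occurrences(values)
-- ===== Notes on version B (the rewrite author's own statement) =====
-- stated objective: alternative
-- what changed: Replaces A's single validating loop followed by dict.fromkeys hash dedup with staged comprehensions (parse all tokens, then validate with min) and a recursive first_occurrences dedup that keeps the head and recurses on the tail with copies of the head filtered out.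
import Mathlib
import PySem

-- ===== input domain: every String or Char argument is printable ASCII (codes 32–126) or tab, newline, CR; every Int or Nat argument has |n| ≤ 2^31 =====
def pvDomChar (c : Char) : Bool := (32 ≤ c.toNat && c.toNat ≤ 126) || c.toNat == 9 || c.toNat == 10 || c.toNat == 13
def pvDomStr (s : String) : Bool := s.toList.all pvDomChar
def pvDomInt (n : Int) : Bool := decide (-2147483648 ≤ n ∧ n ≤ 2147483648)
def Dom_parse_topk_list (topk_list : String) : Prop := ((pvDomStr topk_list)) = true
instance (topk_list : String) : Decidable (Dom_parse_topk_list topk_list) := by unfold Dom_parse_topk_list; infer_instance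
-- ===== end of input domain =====

-- B replaces A's validating loop + dict.fromkeys dedup with a staged comprehension and a
-- recursive dedup that removes later duplicates of the head (objective: alternative).

-- ===== PORT A =====
-- A's loop body: strip, skip empty, parse int, skip ≤ 0 (A raises there; excluded by Pre_), append
def pvStepA (values : List Int) (token : String) : List Int :=
  let t := PySem.Str.strip token
  if t = "" then values
  else match PySem.Int.ofStr? t with
    | none => values            -- int(token) raises ValueError: outside Pre_
    | some k => if k ≤ 0 then values else values ++ [k]   -- k ≤ 0 raises: outside Pre_

def parse_topk_list (topk_list : String) : List Int :=
  let values := ((PySem.Str.split? topk_list ",").getD []).foldl pvStepA []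
  PySem.List.dedup values       -- list(dict.fromkeys(values))

-- ===== PORT B =====
-- the comprehension: [int(t.strip()) for t in topk_list.split(",") if t.strip()]
-- (a token whose int() raises is dropped here instead of raising: outside Pre_)
def pvParsedValues (topk_list : String) : List Int :=
  ((PySem.Str.split? topk_list ",").getD []).filterMap
    (fun t => let u := PySem.Str.strip t; if u = "" then none else PySem.Int.ofStr? u)

-- first_occurrences: keep the head, recurse on the tail with all copies of the head removed
def pvFirstOcc : List Int → List Int
  | [] => []
  | a :: vs => a :: pvFirstOcc (vs.filter (fun v => v ≠ a))
termination_by vs => vs.length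
decreasing_by
  simp only [List.length_unattach]
  exact Nat.lt_succ_of_le (le_trans (List.length_filter_le _ _) (by simp))

-- B's empty / min(values) ≤ 0 checks raise ValueError: both excluded by Pre_
def parse_topk_list_alt (topk_list : String) : List Int :=
  pvFirstOcc (pvParsedValues topk_list)

-- ===== PRECONDITION & SPEC =====
-- Pre_ excludes exactly the inputs on which Python A raises ValueError: a non-empty stripped
-- token that is not a valid int literal or parses to k ≤ 0, or no non-empty token at all.
def Pre_parse_topk_list (topk_list : String) : Prop :=
  let ts := (((PySem.Str.split? topk_list ",").getD []).map PySem.Str.strip).filter (fun t => t ≠ "")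
  ts ≠ [] ∧ ∀ t ∈ ts, ((PySem.Int.ofStr? t).elim false (fun k => decide (0 < k))) = true
instance (topk_list : String) : Decidable (Pre_parse_topk_list topk_list) := by
  unfold Pre_parse_topk_list; infer_instance

def pvWitness_parse_topk_list : String := "3, 1,3,2"

def Spec_parse_topk_list (topk_list : String) (out : List Int) : Prop := out = parse_topk_list_alt topk_list
instance (topk_list : String) (out : List Int) : Decidable (Spec_parse_topk_list topk_list out) := by unfold Spec_parse_topk_list; infer_instance

-- ===== CLAIM (what is proved, stated in full; the proofs are below) =====
def Claim_equal_parse_topk_list : Prop := ∀ (topk_list : String), Dom_parse_topk_list topk_list → Pre_parse_topk_list topk_list → Spec_parse_topk_list topk_list (parse_topk_list topk_list)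

-- ===== LEMMAS AND PROOFS =====

-- the contribution of one token to A's `values`
def pvTok (token : String) : List Int :=
  let t := PySem.Str.strip token
  if t = "" then []
  else match PySem.Int.ofStr? t with
    | none => []
    | some k => if k ≤ 0 then [] else [k]

theorem pvStepA_eq (v : List Int) (tok : String) : pvStepA v tok = v ++ pvTok tok := by
  by_cases h : PySem.Str.strip tok = ""
  · simp [pvStepA, pvTok, h]
  · cases h2 : PySem.Int.ofStr? (PySem.Str.strip tok) with
    | none => simp [pvStepA, pvTok, h, h2]
    | some k =>
      by_cases hk : k ≤ 0 <;> simp [pvStepA, pvTok, h, h2, hk]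

theorem pvAloop (toks : List String) : ∀ v : List Int,
    toks.foldl pvStepA v = v ++ toks.flatMap pvTok := by
  induction toks with
  | nil => simp [List.foldl]
  | cons t ts ih =>
    intro v
    simp [List.foldl, pvStepA_eq, ih, List.append_assoc]

-- under Pre_'s per-token condition, A's values list is exactly B's comprehension
theorem pvValues_eq (toks : List String)
    (h : ∀ t ∈ toks, PySem.Str.strip t ≠ "" →
      ((PySem.Int.ofStr? (PySem.Str.strip t)).elim false (fun k => decide (0 < k))) = true) :
    toks.flatMap pvTok =
      toks.filterMap (fun t => let u := PySem.Str.strip t; if u = "" then none else PySem.Int.ofStr? u) := by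
  induction toks with
  | nil => rfl
  | cons t ts ih =>
    have ht := h t (by simp)
    have hts := fun x hx => h x (List.mem_cons_of_mem _ hx)
    by_cases he : PySem.Str.strip t = ""
    · simp [pvTok, he, ih hts]
    · cases h2 : PySem.Int.ofStr? (PySem.Str.strip t) with
      | none => rw [h2] at ht; simp at ht; exact absurd ht he
      | some k =>
        have hk : ¬ k ≤ 0 := by
          have h3 := ht he
          rw [h2] at h3
          simp at h3
          omega
        simp [pvTok, he, h2, hk, ih hts]

-- Set.ofList builds exactly first_occurrences
theorem pvFoldlAdd (xs : List Int) : ∀ acc : List Int,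
    xs.foldl PySem.Set.add acc = acc ++ pvFirstOcc (xs.filter (fun x => decide (x ∉ acc))) := by
  induction xs with
  | nil => intro acc; simp [pvFirstOcc]
  | cons a xs ih =>
    intro acc
    by_cases ha : a ∈ acc
    · have hadd : PySem.Set.add acc a = acc := by
        simp [PySem.Set.add, PySem.Set.contains, ha]
      simp only [List.foldl_cons, hadd, List.filter_cons, decide_not]
      simp [ha, ih acc]
    · have hadd : PySem.Set.add acc a = acc ++ [a] := by
        simp [PySem.Set.add, PySem.Set.contains, ha]
      simp only [List.foldl_cons, hadd, List.filter_cons, decide_not]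
      rw [ih (acc ++ [a])]
      simp [ha, pvFirstOcc]
      exact congrArg pvFirstOcc (List.filter_congr fun x _ => by
        by_cases h1 : x = a <;> by_cases h2 : x ∈ acc <;> simp [h1, h2])

theorem pvDedup_eq_firstOcc (xs : List Int) : PySem.List.dedup xs = pvFirstOcc xs := by
  rw [PySem.List.dedup_eq_ofList, PySem.Set.ofList_eq_foldl, pvFoldlAdd]
  simp

-- ===== VERDICT (by name: the statement is the Claim_ definition above) =====
theorem parse_topk_list_spec : Claim_equal_parse_topk_list := by
  intro s _ hpre
  obtain ⟨-, hall⟩ := hpre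
  unfold Spec_parse_topk_list parse_topk_list parse_topk_list_alt pvParsedValues
  rw [pvAloop, List.nil_append, pvDedup_eq_firstOcc,
    pvValues_eq _ (fun t ht hne => by
      exact hall (PySem.Str.strip t) (by
        simp only [List.mem_filter, List.mem_map]
        exact ⟨⟨t, ht, rfl⟩, by simpa using hne⟩))]
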